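-- pv_equiv track=rewrite | github.com/FelixPotato2/Evaluating-NLI-Explanations | evaluate_LLMs.py | _relation_word_count_from_annotators
-- ===== SOURCE A (Python) =====
-- def _relation_word_count_from_annotators(answer_groups):
--     """
--     Count words in annotator relations using the extracted token lists already in `answers`.
--     Counts left+right tokens for every relation occurrence.
--     """
--     total = 0
--     for group in answer_groups:
--         lefts = group.get("left", [])
--         rights = group.get("right", [])
--         # count all combinations, consistent with how you previously built ann_strings
--         for left_tokens in lefts:
--             for right_tokens in rights:
--                 total += len(left_tokens) + len(right_tokens)
--     return total
-- ===== SOURCE B (Python) =====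
-- def _relation_word_count_from_annotators(answer_groups):
--     """Factored per-group contribution (no nested pair loop), mapped over groups and summed."""
--     def contribution(group):
--         lefts = group.get("left", [])
--         rights = group.get("right", [])
--         return sum(map(len, lefts)) * len(rights) + len(lefts) * sum(map(len, rights))
--     return sum(map(contribution, answer_groups))
-- ===== Notes on version B (the rewrite author's own statement) =====
-- stated objective: alternative
-- what changed: Replaces A's nested left-by-right accumulation loops with a per-group closed-form contribution (sum of left token-list lengths * |rights| + |lefts| * sum of right token-list lengths), mapped over the groups and summed.
import Mathlib
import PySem

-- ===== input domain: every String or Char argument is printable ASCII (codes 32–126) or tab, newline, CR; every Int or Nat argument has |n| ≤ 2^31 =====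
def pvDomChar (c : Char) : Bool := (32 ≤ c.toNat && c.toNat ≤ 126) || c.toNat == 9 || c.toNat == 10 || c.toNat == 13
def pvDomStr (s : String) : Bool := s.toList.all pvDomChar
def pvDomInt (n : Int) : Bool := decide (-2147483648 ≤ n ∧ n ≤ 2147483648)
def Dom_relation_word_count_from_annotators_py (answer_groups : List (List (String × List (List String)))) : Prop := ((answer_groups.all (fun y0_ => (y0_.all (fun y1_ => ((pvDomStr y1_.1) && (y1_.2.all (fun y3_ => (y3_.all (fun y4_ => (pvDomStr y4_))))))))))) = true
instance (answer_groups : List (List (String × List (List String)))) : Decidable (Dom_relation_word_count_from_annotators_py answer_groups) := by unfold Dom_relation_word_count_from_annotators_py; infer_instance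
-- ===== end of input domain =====

-- ===== PORT A =====
-- B replaces A's nested left-by-right loops with a per-group closed-form contribution,
-- mapped over the groups and summed (alternative decomposition, same measured cost).
def relation_word_count_from_annotators_py (answer_groups : List (List (String × List (List String)))) : Int :=
  answer_groups.foldl (fun total group =>
    let lefts := PySem.Dict.getD (PySem.Dict.mk group) "left" []
    let rights := PySem.Dict.getD (PySem.Dict.mk group) "right" []
    lefts.foldl (fun t left_tokens =>
      rights.foldl (fun t right_tokens =>
        t + ((left_tokens.length : Int) + (right_tokens.length : Int))) t) total) 0

-- ===== PORT B =====
def pvContribution (group : List (String × List (List String))) : Int :=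
  let lefts := PySem.Dict.getD (PySem.Dict.mk group) "left" []
  let rights := PySem.Dict.getD (PySem.Dict.mk group) "right" []
  ((lefts.map List.length).sum : Int) * (rights.length : Int)
    + (lefts.length : Int) * ((rights.map List.length).sum : Int)

def relation_word_count_from_annotators_py_alt (answer_groups : List (List (String × List (List String)))) : Int :=
  (answer_groups.map pvContribution).sum

-- ===== PRECONDITION & SPEC =====
def Spec_relation_word_count_from_annotators_py (answer_groups : List (List (String × List (List String)))) (out : Int) : Prop := out = relation_word_count_from_annotators_py_alt answer_groups
instance (answer_groups : List (List (String × List (List String)))) (out : Int) : Decidable (Spec_relation_word_count_from_annotators_py answer_groups out) := by unfold Spec_relation_word_count_from_annotators_py; infer_instance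

-- ===== CLAIM (what is proved, stated in full; the proofs are below) =====
def Claim_equal_relation_word_count_from_annotators_py : Prop := ∀ (answer_groups : List (List (String × List (List String)))), Dom_relation_word_count_from_annotators_py answer_groups → Spec_relation_word_count_from_annotators_py answer_groups (relation_word_count_from_annotators_py answer_groups)

-- ===== LEMMAS AND PROOFS =====
theorem pv_inner (rs : List (List String)) (t c : Int) :
    rs.foldl (fun t rt => t + (c + (rt.length : Int))) t
      = t + c * (rs.length : Int) + ((rs.map List.length).sum : Int) := by
  induction rs generalizing t with
  | nil => simp
  | cons r rs ih =>
      simp only [List.foldl_cons, List.length_cons, List.map_cons, List.sum_cons]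
      rw [ih]
      push_cast
      ring

theorem pv_outer (ls rs : List (List String)) (total : Int) :
    ls.foldl (fun t lt => rs.foldl (fun t rt => t + ((lt.length : Int) + (rt.length : Int))) t) total
      = total + ((ls.map List.length).sum : Int) * (rs.length : Int)
          + (ls.length : Int) * ((rs.map List.length).sum : Int) := by
  induction ls generalizing total with
  | nil => simp
  | cons l ls ih =>
      simp only [List.foldl_cons, List.length_cons, List.map_cons, List.sum_cons]
      rw [pv_inner, ih]
      push_cast
      ring

theorem pv_main (gs : List (List (String × List (List String)))) (total : Int) :
    gs.foldl (fun total group =>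
      let lefts := PySem.Dict.getD (PySem.Dict.mk group) "left" []
      let rights := PySem.Dict.getD (PySem.Dict.mk group) "right" []
      lefts.foldl (fun t left_tokens =>
        rights.foldl (fun t right_tokens =>
          t + ((left_tokens.length : Int) + (right_tokens.length : Int))) t) total) total
    = total + (gs.map pvContribution).sum := by
  induction gs generalizing total with
  | nil => simp
  | cons g gs ih =>
      simp only [List.foldl_cons, List.map_cons, List.sum_cons]
      rw [pv_outer, ih]
      unfold pvContribution
      ring

-- ===== VERDICT (by name: the statement is the Claim_ definition above) =====
theorem relation_word_count_from_annotators_py_spec : Claim_equal_relation_word_count_from_annotators_py := by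
  intro gs _
  unfold Spec_relation_word_count_from_annotators_py relation_word_count_from_annotators_py relation_word_count_from_annotators_py_alt
  rw [pv_main]
  ring
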